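-- pv_equiv track=rewrite | github.com/pypi-data/pypi-mirror-382 | packages/nestful-wrapper/nestful_wrapper-0.1.7-py3-none-any.whl/nestful/utils.py | merge_quoted_parameters
-- ===== SOURCE A (Python) =====
-- from typing import List, Optional, Tuple
--
-- def merge_quoted_parameters(list_of_parameters: List[str]) -> List[str]:
--     new_parameters = []
--
--     new_parameter = ""
--     merge_on = False
--     num_mergers = 0
--
--     for parameter in list_of_parameters:
--         if parameter.startswith('"') and parameter.count('"') % 2 == 1:
--             merge_on = True
--
--         if '="' in parameter and parameter.count('"') % 2 == 1:
--             merge_on = True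
--
--         if merge_on:
--             new_parameter += f'{", " if new_parameter else ""}{parameter}'
--             num_mergers += 1
--
--         if new_parameter.count('"') % 2 == 0:
--             merge_on = False
--
--         if not merge_on:
--             temp = new_parameter or parameter
--             new_parameter = ""
--
--             if temp:
--                 new_parameters.append(temp)
--
--     if num_mergers > 0:
--         return merge_quoted_parameters(new_parameters)
--
--     return new_parameters
-- ===== SOURCE B (Python) =====
-- def merge_quoted_parameters(list_of_parameters):
--     # Single pass with an explicit merge buffer; A's recursion is always a no-op
--     # second pass, so it is dropped.
--     result = []
--     buf = None
--     for p in list_of_parameters: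
--         if buf is not None:
--             buf += ", " + p
--             if buf.count('"') % 2 == 0:
--                 result.append(buf)
--                 buf = None
--         elif p.count('"') % 2 == 1 and (p.startswith('"') or '="' in p):
--             buf = p
--         elif p:
--             result.append(p)
--     return result
-- ===== Notes on version B (the rewrite author's own statement) =====
-- stated objective: simpler
-- what changed: Replaced A's recursive multi-pass merge (re-scan the whole merged list whenever any merge happened, with a four-part loop state) with a single left-to-right pass keeping just an explicit Optional merge buffer; A's recursion is provably always a no-op second pass.
import Mathlib
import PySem

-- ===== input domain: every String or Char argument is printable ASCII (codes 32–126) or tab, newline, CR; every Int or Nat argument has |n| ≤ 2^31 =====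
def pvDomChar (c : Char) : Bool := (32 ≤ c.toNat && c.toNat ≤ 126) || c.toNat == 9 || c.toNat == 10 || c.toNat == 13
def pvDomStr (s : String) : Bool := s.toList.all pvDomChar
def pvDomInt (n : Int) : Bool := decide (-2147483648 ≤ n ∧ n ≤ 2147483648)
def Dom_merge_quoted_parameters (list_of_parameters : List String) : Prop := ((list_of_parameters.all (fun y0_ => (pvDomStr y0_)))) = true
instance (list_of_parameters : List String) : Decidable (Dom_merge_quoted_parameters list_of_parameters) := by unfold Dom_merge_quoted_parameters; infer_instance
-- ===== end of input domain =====

-- B replaces A's recursive multi-pass merge with a single pass keeping an explicit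
-- merge buffer (A's recursion is a provable no-op second pass); objective: simpler.


-- ===== PORT A =====
-- Strings are handled as List Char (PySem.Chars is exact there); entries enter via
-- String.toList and leave via String.ofList.  One loop iteration of A, state =
-- (new_parameters, new_parameter, merge_on, num_mergers):
def mergeStepA (st : List (List Char) × List Char × Bool × Nat) (parameter : List Char) :
    List (List Char) × List Char × Bool × Nat :=
  let (new_parameters, new_parameter, merge_on, num_mergers) := st
  let merge_on :=
    if PySem.Chars.startswith parameter ['"'] && PySem.Chars.count parameter ['"'] % 2 == 1 then true
    else merge_on
  let merge_on :=
    if PySem.Chars.isIn ['=', '"'] parameter && PySem.Chars.count parameter ['"'] % 2 == 1 then true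
    else merge_on
  let (new_parameter, num_mergers) :=
    if merge_on then
      (new_parameter ++ (if new_parameter ≠ [] then [',', ' '] else []) ++ parameter, num_mergers + 1)
    else (new_parameter, num_mergers)
  let merge_on := if PySem.Chars.count new_parameter ['"'] % 2 == 0 then false else merge_on
  if !merge_on then
    let temp := if new_parameter ≠ [] then new_parameter else parameter
    if temp ≠ [] then (new_parameters ++ [temp], [], merge_on, num_mergers)
    else (new_parameters, [], merge_on, num_mergers)
  else (new_parameters, new_parameter, merge_on, num_mergers)

-- A's recursion; the fuel (length + 1) only makes it structural, it is never exhausted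
-- (a recursive call happens only when num_mergers > 0, i.e. on a nonempty list).
def mergeQuotedRecA : Nat → List (List Char) → List (List Char)
  | 0, l => l
  | fuel + 1, l =>
    let st := l.foldl mergeStepA ([], [], false, 0)
    if st.2.2.2 > 0 then mergeQuotedRecA fuel st.1 else st.1

def merge_quoted_parameters (list_of_parameters : List String) : List String :=
  (mergeQuotedRecA (list_of_parameters.length + 1) (list_of_parameters.map String.toList)).map
    (fun cs => String.ofList cs)

-- ===== PORT B =====
-- one loop iteration of B, state = (result, buf : Option)
def mergeStepB (st : List (List Char) × Option (List Char)) (p : List Char) :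
    List (List Char) × Option (List Char) :=
  match st with
  | (result, some buf) =>
    let buf := buf ++ [',', ' '] ++ p
    if PySem.Chars.count buf ['"'] % 2 == 0 then (result ++ [buf], none) else (result, some buf)
  | (result, none) =>
    if PySem.Chars.count p ['"'] % 2 == 1 &&
        (PySem.Chars.startswith p ['"'] || PySem.Chars.isIn ['=', '"'] p) then (result, some p)
    else if p ≠ [] then (result ++ [p], none)
    else (result, none)

def merge_quoted_parameters_alt (list_of_parameters : List String) : List String :=
  ((list_of_parameters.map String.toList).foldl mergeStepB ([], none)).1.map
    (fun cs => String.ofList cs)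

-- ===== PRECONDITION & SPEC =====
def Spec_merge_quoted_parameters (list_of_parameters : List String) (out : List String) : Prop := out = merge_quoted_parameters_alt list_of_parameters
instance (list_of_parameters : List String) (out : List String) : Decidable (Spec_merge_quoted_parameters list_of_parameters out) := by unfold Spec_merge_quoted_parameters; infer_instance

-- ===== CLAIM (what is proved, stated in full; the proofs are below) =====
def Claim_equal_merge_quoted_parameters : Prop := ∀ (list_of_parameters : List String), Dom_merge_quoted_parameters list_of_parameters → Spec_merge_quoted_parameters list_of_parameters (merge_quoted_parameters list_of_parameters)

-- ===== LEMMAS AND PROOFS =====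

-- counting a single character as a substring is List.count
theorem chars_count_go_single (c : Char) :
    ∀ (s : List Char) (fuel acc : Nat), s.length ≤ fuel →
      PySem.Chars.count.go [c] fuel s acc = acc + s.count c := by
  intro s
  induction s with
  | nil => intro fuel acc _; cases fuel <;> simp [PySem.Chars.count.go]
  | cons h t ih =>
    intro fuel acc hf
    cases fuel with
    | zero => simp at hf
    | succ n =>
      have hlen : t.length ≤ n := by simpa using hf
      simp only [PySem.Chars.count.go, List.count_cons]
      by_cases hc : c = h
      · subst hc
        rw [if_pos (by simp [List.isPrefixOf_iff_prefix])]
        simp only [List.length_singleton, List.drop_one, List.tail_cons]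
        rw [ih n (acc + 1) hlen]
        simp; omega
      · rw [if_neg (by simp [List.isPrefixOf_iff_prefix, List.cons_prefix_cons, hc])]
        rw [ih n acc hlen]
        have : (h == c) = false := by simp [Ne.symm hc]
        simp [this]

theorem chars_count_single (c : Char) (s : List Char) :
    PySem.Chars.count s [c] = s.count c := by
  have h1 : (([c] : List Char).isEmpty) = false := by simp
  simp only [PySem.Chars.count, h1, Bool.false_eq_true, if_false]
  simpa using chars_count_go_single c s s.length 0 le_rfl

def mqpOdd (s : List Char) : Bool := PySem.Chars.count s ['"'] % 2 == 1

def mqpTrig (p : List Char) : Bool :=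
  mqpOdd p && (PySem.Chars.startswith p ['"'] || PySem.Chars.isIn ['=', '"'] p)

theorem mqpOdd_ne_nil {p : List Char} (h : mqpOdd p = true) : p ≠ [] := by
  intro hnil; subst hnil
  simp [mqpOdd, chars_count_single] at h

-- entries already in the output: never re-trigger a merge, nonempty
def mqpInert (s : List Char) : Prop := mqpTrig s = false ∧ s ≠ []

theorem mqpTrig_false_iff (p : List Char) :
    mqpTrig p = false ↔
      ((PySem.Chars.startswith p ['"'] && PySem.Chars.count p ['"'] % 2 == 1) = false ∧
       (PySem.Chars.isIn ['=', '"'] p && PySem.Chars.count p ['"'] % 2 == 1) = false) := by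
  simp only [mqpTrig, mqpOdd]
  cases (PySem.Chars.count p ['"'] % 2 == 1) <;>
  cases PySem.Chars.startswith p ['"'] <;>
  cases PySem.Chars.isIn ['=', '"'] p <;> simp

-- what one iteration of A does, in each of the three situations its state can be in
theorem stepA_merge (res : List (List Char)) (np p : List Char) (nm : Nat) (hnp : np ≠ []) :
    mergeStepA (res, np, true, nm) p =
      if PySem.Chars.count (np ++ [',', ' '] ++ p) ['"'] % 2 == 0 then
        (res ++ [np ++ [',', ' '] ++ p], [], false, nm + 1)
      else (res, np ++ [',', ' '] ++ p, true, nm + 1) := by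
  simp only [mergeStepA, ite_self, if_pos rfl, hnp, ne_eq, not_false_eq_true, ite_true]
  split
  · simp
  · simp

theorem stepA_idle (res : List (List Char)) (p : List Char) (nm : Nat)
    (h1 : (PySem.Chars.startswith p ['"'] && PySem.Chars.count p ['"'] % 2 == 1) = false)
    (h2 : (PySem.Chars.isIn ['=', '"'] p && PySem.Chars.count p ['"'] % 2 == 1) = false) :
    mergeStepA (res, [], false, nm) p =
      if p ≠ [] then (res ++ [p], [], false, nm) else (res, [], false, nm) := by
  simp only [mergeStepA, h1, h2, Bool.false_eq_true, if_false, ite_self, ne_eq,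
    not_true_eq_false]
  simp

theorem stepA_start (res : List (List Char)) (p : List Char) (nm : Nat)
    (hodd : (PySem.Chars.count p ['"'] % 2 == 1) = true)
    (h12 : (PySem.Chars.startswith p ['"'] || PySem.Chars.isIn ['=', '"'] p) = true) :
    mergeStepA (res, [], false, nm) p = (res, p, true, nm + 1) := by
  have hmo : (if PySem.Chars.isIn ['=', '"'] p && PySem.Chars.count p ['"'] % 2 == 1 then true
      else if PySem.Chars.startswith p ['"'] && PySem.Chars.count p ['"'] % 2 == 1 then true
      else false) = true := by
    rcases Bool.or_eq_true_iff.mp h12 with h | h <;> simp [h, hodd]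
  have hpe : PySem.Chars.count p ['"'] % 2 ≠ 0 := by
    simp only [beq_iff_eq] at hodd; omega
  simp only [mergeStepA, hmo, if_pos rfl, ne_eq, not_true_eq_false, Bool.false_eq_true,
    ite_false, List.nil_append, if_neg hpe]
  simp [hpe]

-- full invariant of A's loop state + correspondence to B's state
def mqpRel (a : List (List Char) × List Char × Bool × Nat)
    (b : List (List Char) × Option (List Char)) : Prop :=
  b.1 = a.1 ∧ b.2 = (if a.2.2.1 then some a.2.1 else none) ∧
  (a.2.2.1 = true → a.2.1 ≠ [] ∧ mqpOdd a.2.1 = true) ∧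
  (a.2.2.1 = false → a.2.1 = []) ∧
  (∀ s ∈ a.1, mqpInert s)

theorem mqpStep (a : List (List Char) × List Char × Bool × Nat)
    (b : List (List Char) × Option (List Char)) (p : List Char) (h : mqpRel a b) :
    mqpRel (mergeStepA a p) (mergeStepB b p) := by
  obtain ⟨res, np, mo, nm⟩ := a
  obtain ⟨resB, buf⟩ := b
  obtain ⟨hres, hbuf, hmoT, hmoF, hinert⟩ := h
  simp only at hres hbuf hmoT hmoF hinert
  subst hres
  cases mo with
  | true =>
    obtain ⟨hnp, hodd⟩ := hmoT rfl
    rw [if_pos rfl] at hbuf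
    subst hbuf
    rw [stepA_merge resB np p nm hnp]
    simp only [mergeStepB]
    by_cases hev : (PySem.Chars.count (np ++ [',', ' '] ++ p) ['"'] % 2 == 0) = true
    · rw [if_pos hev, if_pos hev]
      refine ⟨rfl, by simp, by simp, by simp, ?_⟩
      intro s hs
      rcases List.mem_append.mp hs with hs | hs
      · exact hinert s hs
      · simp only [List.mem_singleton] at hs; subst hs
        refine ⟨?_, by simp [hnp]⟩
        have ho : mqpOdd (np ++ [',', ' '] ++ p) = false := by
          simp only [mqpOdd, beq_iff_eq] at hev ⊢
          simp only [beq_eq_false_iff_ne, ne_eq]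
          omega
        have hfin : mqpTrig (np ++ [',', ' '] ++ p) = false := by
          simp only [mqpTrig, ho, Bool.false_and]
        simpa using hfin
    · rw [if_neg hev, if_neg hev]
      refine ⟨rfl, by simp, ?_, by simp, hinert⟩
      intro _
      refine ⟨by simp [hnp], ?_⟩
      simp only [mqpOdd, beq_iff_eq] at hev ⊢
      omega
  | false =>
    have hnp : np = [] := hmoF rfl
    subst hnp
    rw [if_neg (by simp)] at hbuf
    subst hbuf
    simp only [mergeStepB]
    have hBc : (PySem.Chars.count p ['"'] % 2 == 1 &&
        (PySem.Chars.startswith p ['"'] || PySem.Chars.isIn ['=', '"'] p)) = mqpTrig p := by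
      simp [mqpTrig, mqpOdd, Bool.and_comm]
    rw [hBc]
    by_cases htr : mqpTrig p = true
    · have htr2 : mqpOdd p = true ∧
          (PySem.Chars.startswith p ['"'] || PySem.Chars.isIn ['=', '"'] p) = true := by
        simpa [mqpTrig, Bool.and_eq_true] using htr
      have hodd : (PySem.Chars.count p ['"'] % 2 == 1) = true := by
        simpa [mqpOdd] using htr2.1
      have h12 := htr2.2
      rw [stepA_start resB p nm hodd h12, if_pos htr]
      exact ⟨rfl, by simp, fun _ => ⟨mqpOdd_ne_nil htr2.1, htr2.1⟩, by simp, hinert⟩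
    · have htr' : mqpTrig p = false := by simpa using htr
      obtain ⟨h1, h2⟩ := (mqpTrig_false_iff p).mp htr'
      rw [stepA_idle resB p nm h1 h2, if_neg htr]
      by_cases hp : p = []
      · rw [if_neg (by simp [hp]), if_neg (by simp [hp])]
        exact ⟨rfl, by simp, by simp, by simp, hinert⟩
      · rw [if_pos (by simp [hp]), if_pos (by simp [hp])]
        refine ⟨rfl, by simp, by simp, by simp, ?_⟩
        intro s hs
        rcases List.mem_append.mp hs with hs | hs
        · exact hinert s hs
        · simp only [List.mem_singleton] at hs; subst hs; exact ⟨htr', hp⟩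

theorem mqpFoldRel : ∀ (l : List (List Char)) a b, mqpRel a b →
    mqpRel (l.foldl mergeStepA a) (l.foldl mergeStepB b) := by
  intro l
  induction l with
  | nil => intro a b h; exact h
  | cons p t ih => intro a b h; exact ih _ _ (mqpStep a b p h)

-- a list of inert entries passes through A's loop unchanged, with no mergers
theorem mqpInertPass : ∀ (l : List (List Char)), (∀ s ∈ l, mqpInert s) →
    ∀ (res : List (List Char)) (nm : Nat),
      l.foldl mergeStepA (res, [], false, nm) = (res ++ l, [], false, nm) := by
  intro l
  induction l with
  | nil => intro _ res nm; simp
  | cons p t ih =>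
    intro h res nm
    obtain ⟨htr, hp⟩ := h p (by simp)
    obtain ⟨h1, h2⟩ := (mqpTrig_false_iff p).mp htr
    rw [List.foldl_cons, stepA_idle res p nm h1 h2, if_pos hp,
      ih (fun s hs => h s (by simp [hs])) (res ++ [p]) nm]
    simp

-- A's whole computation (first pass + always-idle recursion) equals B's single pass
theorem mqpMain (l : List (List Char)) :
    mergeQuotedRecA (l.length + 1) l = ((l.foldl mergeStepB ([], none)).1) := by
  have hrel : mqpRel (l.foldl mergeStepA ([], [], false, 0)) (l.foldl mergeStepB ([], none)) :=
    mqpFoldRel l ([], [], false, 0) ([], none)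
      ⟨rfl, by simp, by simp, by simp, by simp⟩
  cases l with
  | nil => simp [mergeQuotedRecA]
  | cons c cs =>
    obtain ⟨hres, _, _, _, hinert⟩ := hrel
    simp only [List.length_cons]
    show mergeQuotedRecA (cs.length + 1 + 1) (c :: cs) = _
    simp only [mergeQuotedRecA]
    by_cases hnm : ((c :: cs).foldl mergeStepA ([], [], false, 0)).2.2.2 > 0
    · rw [if_pos hnm]
      -- second pass over the (all-inert) first-pass output is the identity
      cases hl : cs.length with
      | zero =>
        simp only [mergeQuotedRecA]
        rw [mqpInertPass _ hinert [] 0]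
        simpa using hres.symm
      | succ k =>
        simp only [mergeQuotedRecA]
        rw [mqpInertPass _ hinert [] 0]
        simpa using hres.symm
    · rw [if_neg hnm]
      exact hres.symm

-- ===== VERDICT (by name: the statement is the Claim_ definition above) =====
theorem merge_quoted_parameters_spec : Claim_equal_merge_quoted_parameters := by
  intro l _
  show merge_quoted_parameters l = merge_quoted_parameters_alt l
  unfold merge_quoted_parameters merge_quoted_parameters_alt
  rw [← List.length_map (f := String.toList), mqpMain]
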